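-- pv_equiv track=rewrite | github.com/pypi-data/pypi-mirror-396 | packages/merlya/merlya-0.7.1-py3-none-any.whl/merlya/commands/handlers/mcp.py | _extract_env_and_cwd
-- ===== SOURCE A (Python) =====
-- def _extract_env_and_cwd(args: list[str]) -> tuple[dict[str, str], str | None, list[str]]:
--     """Parse env/cwd flags from arguments."""
--     env: dict[str, str] = {}
--     cwd: str | None = None
--     remaining: list[str] = []
--
--     for arg in args:
--         if arg.startswith("--env="):
--             kv = arg[len("--env=") :]
--             if "=" in kv:
--                 key, val = kv.split("=", 1)
--                 env[key] = val
--         elif arg.startswith("--cwd="):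
--             cwd = arg[len("--cwd=") :]
--         else:
--             remaining.append(arg)
--
--     return env, cwd, remaining
-- ===== SOURCE B (Python) =====
-- def _extract_env_and_cwd(args: list[str]) -> tuple[dict[str, str], str | None, list[str]]:
--     """Parse env/cwd flags from arguments (three separate passes)."""
--     remaining = [a for a in args if not a.startswith("--env=") and not a.startswith("--cwd=")]
--     cwds = [a[6:] for a in args if a.startswith("--cwd=")]
--     cwd = cwds[-1] if cwds else None
--     env: dict[str, str] = {}
--     for kv in (a[6:] for a in args if a.startswith("--env=")):
--         if "=" in kv:
--             key, val = kv.split("=", 1)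
--             env[key] = val
--     return env, cwd, remaining
-- ===== Notes on version B (the rewrite author's own statement) =====
-- stated objective: simpler
-- what changed: Replaces A's single classifying loop over a (env, cwd, remaining) triple state by three independent passes: a filter comprehension for remaining, the last '--cwd=' suffix for cwd, and a dict built only from the '--env=' suffixes.
import Mathlib
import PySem

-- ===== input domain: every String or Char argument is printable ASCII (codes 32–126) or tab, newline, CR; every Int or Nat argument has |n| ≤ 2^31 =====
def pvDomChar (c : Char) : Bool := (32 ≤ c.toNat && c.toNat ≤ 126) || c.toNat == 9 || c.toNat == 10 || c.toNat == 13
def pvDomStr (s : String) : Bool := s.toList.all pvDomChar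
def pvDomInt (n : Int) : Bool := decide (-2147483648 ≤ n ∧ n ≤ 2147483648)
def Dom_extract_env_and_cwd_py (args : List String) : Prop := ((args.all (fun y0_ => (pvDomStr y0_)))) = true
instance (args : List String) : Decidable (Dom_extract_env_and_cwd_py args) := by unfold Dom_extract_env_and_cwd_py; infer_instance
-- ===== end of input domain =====

-- B replaces A's single loop over a (env, cwd, remaining) triple by three independent passes
-- (filter for remaining, last --cwd= suffix for cwd, a dict fold over only the --env= suffixes); objective: simpler.

-- ===== PORT A =====
-- loop body of A's single for-loop over the triple state
def pvAStep (st : PySem.Dict String String × Option String × List String) (arg : String) :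
    PySem.Dict String String × Option String × List String :=
  if PySem.Str.startswith arg "--env=" then
    let kv := PySem.Str.slice arg (some 6) none
    if PySem.Str.isIn "=" kv then
      match PySem.Str.splitMax? kv "=" 1 with
      | some (key :: val :: _) => (st.1.insert key val, st.2.1, st.2.2)
      | _ => st  -- unreachable: "=" ∈ kv gives at least two pieces
    else st
  else if PySem.Str.startswith arg "--cwd=" then
    (st.1, some (PySem.Str.slice arg (some 6) none), st.2.2)
  else (st.1, st.2.1, st.2.2 ++ [arg])

def extract_env_and_cwd_py (args : List String) :
    (List (String × String)) × Option String × List String :=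
  let st := args.foldl pvAStep (PySem.Dict.empty, none, [])
  (st.1.items, st.2.1, st.2.2)

-- ===== PORT B =====
-- body of B's env loop: one '--env=' suffix kv assigned into the dict
def pvEnvStep (d : PySem.Dict String String) (kv : String) : PySem.Dict String String :=
  if PySem.Str.isIn "=" kv then
    match PySem.Str.splitMax? kv "=" 1 with
    | some (key :: val :: _) => d.insert key val
    | _ => d
  else d

def extract_env_and_cwd_py_alt (args : List String) :
    (List (String × String)) × Option String × List String :=
  let remaining := args.filter (fun a =>
    !(PySem.Str.startswith a "--env=") && !(PySem.Str.startswith a "--cwd="))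
  let cwds := (args.filter (fun a => PySem.Str.startswith a "--cwd=")).map
    (fun a => PySem.Str.slice a (some 6) none)
  let cwd := cwds.getLast?
  let env := ((args.filter (fun a => PySem.Str.startswith a "--env=")).map
    (fun a => PySem.Str.slice a (some 6) none)).foldl pvEnvStep PySem.Dict.empty
  (env.items, cwd, remaining)

-- ===== PRECONDITION & SPEC =====
def Spec_extract_env_and_cwd_py (args : List String) (out : (List (String × String)) × Option String × List String) : Prop := out = extract_env_and_cwd_py_alt args
instance (args : List String) (out : (List (String × String)) × Option String × List String) : Decidable (Spec_extract_env_and_cwd_py args out) := by unfold Spec_extract_env_and_cwd_py; infer_instance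

-- ===== CLAIM (what is proved, stated in full; the proofs are below) =====
def Claim_equal_extract_env_and_cwd_py : Prop := ∀ (args : List String), Dom_extract_env_and_cwd_py args → Spec_extract_env_and_cwd_py args (extract_env_and_cwd_py args)

-- ===== LEMMAS AND PROOFS =====

theorem getLast?_cons_or {α : Type} (x : α) (l : List α) (c : Option α) :
    ((x :: l).getLast?).or c = (l.getLast?).or (some x) := by
  cases l with
  | nil => simp
  | cons h t =>
    rw [List.getLast?_cons_cons]
    obtain ⟨y, hy⟩ := Option.isSome_iff_exists.mp ((List.getLast?_isSome (l := h :: t)).mpr (by simp))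
    simp [hy]

theorem pvNotCwdOfEnv (a : String) (h : PySem.Str.startswith a "--env=" = true) :
    PySem.Str.startswith a "--cwd=" = false := by
  simp only [PySem.Str.startswith, PySem.Chars.startswith, List.isPrefixOf_iff_prefix] at h ⊢
  rw [Bool.eq_false_iff]
  intro h2
  rw [List.isPrefixOf_iff_prefix] at h2
  rw [List.prefix_iff_eq_take] at h h2
  have hl : ("--env=".toList.length) = ("--cwd=".toList.length) := by decide
  rw [hl] at h
  exact absurd (h2.trans h.symm) (by decide)

theorem loop_eq (args : List String) (d : PySem.Dict String String)
    (c : Option String) (r : List String) :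
    args.foldl pvAStep (d, c, r) =
      (((args.filter (fun a => PySem.Str.startswith a "--env=")).map
          (fun a => PySem.Str.slice a (some 6) none)).foldl pvEnvStep d,
       (((args.filter (fun a => PySem.Str.startswith a "--cwd=")).map
          (fun a => PySem.Str.slice a (some 6) none)).getLast?).or c,
       r ++ args.filter (fun a =>
          !(PySem.Str.startswith a "--env=") && !(PySem.Str.startswith a "--cwd="))) := by
  induction args generalizing d c r with
  | nil => simp
  | cons a rest ih =>
    by_cases h1 : PySem.Str.startswith a "--env=" = true
    · have hstep : pvAStep (d, c, r) a =
          (pvEnvStep d (PySem.Str.slice a (some 6) none), c, r) := by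
        unfold pvAStep pvEnvStep
        rw [if_pos h1]
        dsimp only
        generalize PySem.Str.slice a (some 6) none = kv
        by_cases hin : PySem.Str.isIn "=" kv = true
        · rw [if_pos hin, if_pos hin]
          rcases hm : PySem.Str.splitMax? kv "=" 1 with _ | (_ | ⟨k, _ | ⟨v, t⟩⟩) <;> rfl
        · rw [if_neg hin, if_neg hin]
      have hcwd := pvNotCwdOfEnv a h1
      have hrem : (!(PySem.Str.startswith a "--env=") && !(PySem.Str.startswith a "--cwd=")) = false := by
        rw [h1]; rfl
      rw [List.foldl_cons, hstep, ih,
        List.filter_cons_of_pos (p := fun a => PySem.Str.startswith a "--env=") (l := rest) (by simpa using h1),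
        List.filter_cons_of_neg (p := fun a => PySem.Str.startswith a "--cwd=") (l := rest) (by simpa using hcwd),
        List.filter_cons_of_neg (p := fun a => !(PySem.Str.startswith a "--env=") && !(PySem.Str.startswith a "--cwd=")) (l := rest) (by simpa using hrem),
        List.map_cons, List.foldl_cons]
    · by_cases h2 : PySem.Str.startswith a "--cwd=" = true
      · have hstep : pvAStep (d, c, r) a =
            (d, some (PySem.Str.slice a (some 6) none), r) := by
          unfold pvAStep
          rw [if_neg h1, if_pos h2]
        have hrem : (!(PySem.Str.startswith a "--env=") && !(PySem.Str.startswith a "--cwd=")) = false := by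
          rw [h2]; simp
        rw [List.foldl_cons, hstep, ih,
          List.filter_cons_of_neg (p := fun a => PySem.Str.startswith a "--env=") (l := rest) (by simpa using h1),
          List.filter_cons_of_pos (p := fun a => PySem.Str.startswith a "--cwd=") (l := rest) (by simpa using h2),
          List.filter_cons_of_neg (p := fun a => !(PySem.Str.startswith a "--env=") && !(PySem.Str.startswith a "--cwd=")) (l := rest) (by simpa using hrem),
          List.map_cons, getLast?_cons_or]
      · have hstep : pvAStep (d, c, r) a = (d, c, r ++ [a]) := by
          unfold pvAStep
          rw [if_neg h1, if_neg h2]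
        have hrem : (!(PySem.Str.startswith a "--env=") && !(PySem.Str.startswith a "--cwd=")) = true := by
          simp only [Bool.and_eq_true, Bool.not_eq_true']
          exact ⟨eq_false_of_ne_true h1, eq_false_of_ne_true h2⟩
        rw [List.foldl_cons, hstep, ih,
          List.filter_cons_of_neg (p := fun a => PySem.Str.startswith a "--env=") (l := rest) (by simpa using h1),
          List.filter_cons_of_neg (p := fun a => PySem.Str.startswith a "--cwd=") (l := rest) (by simpa using h2),
          List.filter_cons_of_pos (p := fun a => !(PySem.Str.startswith a "--env=") && !(PySem.Str.startswith a "--cwd=")) (l := rest) (by simpa using hrem),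
          List.append_assoc]
        rfl

-- ===== VERDICT (by name: the statement is the Claim_ definition above) =====
theorem extract_env_and_cwd_py_spec : Claim_equal_extract_env_and_cwd_py := by
  intro args _
  unfold Spec_extract_env_and_cwd_py extract_env_and_cwd_py extract_env_and_cwd_py_alt
  rw [loop_eq]
  simp only [Option.or_none, List.nil_append]
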